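-- pv_equiv track=rewrite | github.com/DanielDeBrem/FATRAG-naGROKerrors | scripts/fatrag_auto.py | choose_model
-- ===== SOURCE A (Python) =====
-- from typing import Any, Dict, List, Optional, Tuple
--
-- def choose_model(installed: List[str], prefs: List[str]) -> Optional[str]:
--     # Exact or prefix/infix matches
--     for pat in prefs:
--         for m in installed:
--             if m == pat or m.startswith(pat) or pat in m:
--                 return m
--     # Fallback: prefer qwen2.5 > llama3.1 > any instruct 7-8B
--     for m in installed:
--         low = m.lower()
--         if "qwen2.5" in low and "instruct" in low and any(x in low for x in ["7b", "8b"]):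
--             return m
--     for m in installed:
--         low = m.lower()
--         if "llama3.1" in low and "instruct" in low and any(x in low for x in ["7b", "8b"]):
--             return m
--     # Any instruct small
--     for m in installed:
--         low = m.lower()
--         if "instruct" in low and any(x in low for x in ["7b", "8b"]):
--             return m
--     # Any instruct
--     for m in installed:
--         if "instruct" in m.lower():
--             return m
--     return installed[0] if installed else None
-- ===== SOURCE B (Python) =====
-- from typing import List, Optional
--
-- def choose_model(installed: List[str], prefs: List[str]) -> Optional[str]:
--     # Preference matches: equality and prefix are both special cases of substring,
--     # so a single "pat in m" test suffices.
--     for pat in prefs: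
--         for m in installed:
--             if pat in m:
--                 return m
--     # Fallback: one pass recording the FIRST model for each priority bucket.
--     first = {"qwen": None, "llama": None, "small": None, "instruct": None}
--     for m in installed:
--         low = m.lower()
--         if "instruct" not in low:
--             continue
--         if first["instruct"] is None:
--             first["instruct"] = m
--         if "7b" in low or "8b" in low:
--             if first["small"] is None:
--                 first["small"] = m
--             if first["qwen"] is None and "qwen2.5" in low:
--                 first["qwen"] = m
--             if first["llama"] is None and "llama3.1" in low:
--                 first["llama"] = m
--     for key in ("qwen", "llama", "small", "instruct"):
--         if first[key] is not None:
--             return first[key]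
--     return installed[0] if installed else None
-- ===== Notes on version B (the rewrite author's own statement) =====
-- stated objective: alternative
-- what changed: The preference test collapses equality/prefix/infix into one substring test, and the four fallback scans over installed are replaced by a single pass that records the first model for each of the four priority buckets, returned in priority order.
import Mathlib
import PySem

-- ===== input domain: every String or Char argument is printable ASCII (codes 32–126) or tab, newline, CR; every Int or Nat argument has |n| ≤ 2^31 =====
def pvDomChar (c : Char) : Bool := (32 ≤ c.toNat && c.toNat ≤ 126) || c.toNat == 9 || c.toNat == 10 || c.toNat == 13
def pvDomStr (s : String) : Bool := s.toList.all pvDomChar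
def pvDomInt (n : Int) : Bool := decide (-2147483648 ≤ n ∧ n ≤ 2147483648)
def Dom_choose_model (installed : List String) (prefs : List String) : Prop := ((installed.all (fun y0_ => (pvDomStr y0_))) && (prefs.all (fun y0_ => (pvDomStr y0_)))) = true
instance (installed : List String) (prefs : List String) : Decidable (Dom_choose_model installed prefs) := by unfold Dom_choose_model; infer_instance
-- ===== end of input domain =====

-- B collapses A's equality/prefix/infix preference test into one substring test and
-- replaces A's four fallback scans by a single pass recording the first model per bucket.


-- ===== PORT A =====
-- inner loop: for m in installed: if m == pat or m.startswith(pat) or pat in m: return m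
def innerA (installed : List String) (pat : String) : Option String :=
  match installed with
  | [] => none
  | m :: rest =>
    if m == pat || PySem.Str.startswith m pat || PySem.Str.isIn pat m then some m
    else innerA rest pat

-- outer loop over prefs
def outerA (prefs : List String) (installed : List String) : Option String :=
  match prefs with
  | [] => none
  | pat :: rest =>
    match innerA installed pat with
    | some m => some m
    | none => outerA rest installed

-- the four fallback conditions of A (each tested on m.lower())
def condQwen (m : String) : Bool :=
  let low := PySem.Str.lower m
  PySem.Str.isIn "qwen2.5" low && PySem.Str.isIn "instruct" low &&
    (["7b", "8b"].any fun x => PySem.Str.isIn x low)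

def condLlama (m : String) : Bool :=
  let low := PySem.Str.lower m
  PySem.Str.isIn "llama3.1" low && PySem.Str.isIn "instruct" low &&
    (["7b", "8b"].any fun x => PySem.Str.isIn x low)

def condSmall (m : String) : Bool :=
  let low := PySem.Str.lower m
  PySem.Str.isIn "instruct" low && (["7b", "8b"].any fun x => PySem.Str.isIn x low)

def condInstr (m : String) : Bool :=
  PySem.Str.isIn "instruct" (PySem.Str.lower m)

-- for m in installed: if cond(m): return m  (each of A's four fallback loops)
def scanA (cond : String → Bool) (installed : List String) : Option String :=
  match installed with
  | [] => none
  | m :: rest => if cond m then some m else scanA cond rest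

def choose_model (installed : List String) (prefs : List String) : Option String :=
  match outerA prefs installed with
  | some m => some m
  | none =>
    match scanA condQwen installed with
    | some m => some m
    | none =>
      match scanA condLlama installed with
      | some m => some m
      | none =>
        match scanA condSmall installed with
        | some m => some m
        | none =>
          match scanA condInstr installed with
          | some m => some m
          | none =>
            match installed with
            | [] => none
            | m :: _ => some m

-- ===== PORT B =====
-- inner loop: for m in installed: if pat in m: return m
def innerB (installed : List String) (pat : String) : Option String :=
  match installed with
  | [] => none
  | m :: rest => if PySem.Str.isIn pat m then some m else innerB rest pat

def outerB (prefs : List String) (installed : List String) : Option String :=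
  match prefs with
  | [] => none
  | pat :: rest =>
    match innerB installed pat with
    | some m => some m
    | none => outerB rest installed

-- one pass: record the first model per bucket (qwen, llama, small, instruct)
def stepB (b : Option String × Option String × Option String × Option String) (m : String) :
    Option String × Option String × Option String × Option String :=
  let low := PySem.Str.lower m
  if PySem.Str.isIn "instruct" low then
    let (q, l, s, i) := b
    let i' := if i.isNone then some m else i
    if PySem.Str.isIn "7b" low || PySem.Str.isIn "8b" low then
      let s' := if s.isNone then some m else s
      let q' := if q.isNone && PySem.Str.isIn "qwen2.5" low then some m else q
      let l' := if l.isNone && PySem.Str.isIn "llama3.1" low then some m else l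
      (q', l', s', i')
    else (q, l, s, i')
  else b

def choose_model_alt (installed : List String) (prefs : List String) : Option String :=
  match outerB prefs installed with
  | some m => some m
  | none =>
    let (q, l, s, i) := installed.foldl stepB (none, none, none, none)
    ((((q.or l).or s).or i)).or installed.head?

-- ===== PRECONDITION & SPEC =====
def Spec_choose_model (installed : List String) (prefs : List String) (out : Option String) : Prop := out = choose_model_alt installed prefs
instance (installed : List String) (prefs : List String) (out : Option String) : Decidable (Spec_choose_model installed prefs out) := by unfold Spec_choose_model; infer_instance

-- ===== CLAIM (what is proved, stated in full; the proofs are below) =====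
def Claim_equal_choose_model : Prop := ∀ (installed : List String) (prefs : List String), Dom_choose_model installed prefs → Spec_choose_model installed prefs (choose_model installed prefs)

-- ===== LEMMAS AND PROOFS =====

-- equality and prefix are special cases of substring
lemma pref_cond_eq (m pat : String) :
    (m == pat || PySem.Str.startswith m pat || PySem.Str.isIn pat m) = PySem.Str.isIn pat m := by
  cases h : PySem.Str.isIn pat m with
  | true => simp
  | false =>
    have hinf : ¬ pat.toList <:+: m.toList := by
      rw [← PySem.Str.isIn_iff_infix, h]; simp
    have hC : PySem.Chars.isIn pat.toList m.toList = false := by simpa using h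
    have h1 : (m == pat) = false := by
      rw [beq_eq_false_iff_ne]
      rintro rfl; exact hinf (List.infix_refl _)
    have h2 : PySem.Chars.startswith m.toList pat.toList = false := by
      rw [Bool.eq_false_iff]
      intro hsw
      exact hinf ((PySem.Chars.startswith_iff _ _).mp hsw).isInfix
    simp [h1, h2]

lemma innerA_eq_innerB (installed : List String) (pat : String) :
    innerA installed pat = innerB installed pat := by
  induction installed with
  | nil => rfl
  | cons m rest ih => simp only [innerA, innerB, pref_cond_eq, ih]

lemma outerA_eq_outerB (prefs installed : List String) :
    outerA prefs installed = outerB prefs installed := by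
  induction prefs with
  | nil => rfl
  | cons pat rest ih => simp only [outerA, outerB, innerA_eq_innerB, ih]

lemma scanA_eq_find? (cond : String → Bool) (installed : List String) :
    scanA cond installed = installed.find? cond := by
  induction installed with
  | nil => rfl
  | cons m rest ih => simp [scanA, List.find?, ih]; split <;> simp_all

-- "record the first match" composes with Option.or
lemma or_record (q : Option String) (c : String → Bool) (m : String) (rest : List String) :
    (if c m then q.or (some m) else q).or (rest.find? c) = q.or ((m :: rest).find? c) := by
  cases hc : c m <;> cases q <;> simp [hc, Option.or]

-- one step of B's pass, expressed through A's four conditions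
set_option maxHeartbeats 2000000 in
lemma stepB_eq (q l s i : Option String) (m : String) :
    stepB (q, l, s, i) m =
      ((if condQwen m then q.or (some m) else q),
       (if condLlama m then l.or (some m) else l),
       (if condSmall m then s.or (some m) else s),
       (if condInstr m then i.or (some m) else i)) := by
  simp only [stepB, condQwen, condLlama, condSmall, condInstr, List.any_cons, List.any_nil,
    Bool.or_false]
  rcases Bool.eq_false_or_eq_true (PySem.Str.isIn "instruct" (PySem.Str.lower m)) with hI | hI <;>
  rcases Bool.eq_false_or_eq_true (PySem.Str.isIn "7b" (PySem.Str.lower m)) with h7 | h7 <;>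
  rcases Bool.eq_false_or_eq_true (PySem.Str.isIn "8b" (PySem.Str.lower m)) with h8 | h8 <;>
  rcases Bool.eq_false_or_eq_true (PySem.Str.isIn "qwen2.5" (PySem.Str.lower m)) with hQ | hQ <;>
  rcases Bool.eq_false_or_eq_true (PySem.Str.isIn "llama3.1" (PySem.Str.lower m)) with hL | hL <;>
  cases q <;> cases l <;> cases s <;> cases i <;>
    simp only [hI, h7, h8, hQ, hL] <;> simp [Option.or]

lemma foldB_eq (installed : List String) (q l s i : Option String) :
    installed.foldl stepB (q, l, s, i) =
      (q.or (installed.find? condQwen), l.or (installed.find? condLlama),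
       s.or (installed.find? condSmall), i.or (installed.find? condInstr)) := by
  induction installed generalizing q l s i with
  | nil => simp
  | cons m rest ih =>
    simp only [List.foldl_cons]
    rw [stepB_eq, ih]
    simp only [Prod.mk.injEq]
    exact ⟨or_record _ _ _ _, or_record _ _ _ _, or_record _ _ _ _, or_record _ _ _ _⟩

-- ===== VERDICT (by name: the statement is the Claim_ definition above) =====
theorem choose_model_spec : Claim_equal_choose_model := by
  intro installed prefs _
  show choose_model installed prefs = choose_model_alt installed prefs
  unfold choose_model choose_model_alt
  rw [outerA_eq_outerB]
  cases outerB prefs installed with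
  | some m => rfl
  | none =>
    simp only [foldB_eq, Option.none_or, scanA_eq_find?]
    cases installed.find? condQwen <;> cases installed.find? condLlama <;>
      cases installed.find? condSmall <;> cases installed.find? condInstr <;>
      cases installed <;> simp [Option.or]
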